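-- pv_equiv track=rewrite | github.com/abantikatonny/Special-Topics-of-Statistics-assignments-SHSU- | Assignment 1/Question_number_4.py | reduce_to_weekly
-- ===== SOURCE A (Python) =====
-- def reduce_to_weekly(input_list):
--     weekly_count = []
--     temp_sum = 0
--     counter = 0
--
--     for i, value in enumerate(input_list):
--         temp_sum = temp_sum + input_list[i]
--         counter += 1
--
--         if counter % 7 == 0:
--             weekly_count.append(temp_sum)
--             temp_sum = 0
--
--     if temp_sum > 0:
--         weekly_count.append(temp_sum)
--
--     return weekly_count
-- ===== SOURCE B (Python) =====
-- def reduce_to_weekly(input_list):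
--     weekly_count = []
--     i = 0
--     n = len(input_list)
--     while i < n:
--         chunk = input_list[i:i+7]
--         s = sum(chunk)
--         if len(chunk) == 7 or s > 0:
--             weekly_count.append(s)
--         i += 7
--     return weekly_count
-- ===== Notes on version B (the rewrite author's own statement) =====
-- stated objective: idiomatic
-- what changed: B slices the list into 7-element chunks and sums each chunk, instead of maintaining a running sum and a counter tested with % 7 on every element; the trailing-partial-week > 0 guard applies only to a short final chunk.
import Mathlib
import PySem

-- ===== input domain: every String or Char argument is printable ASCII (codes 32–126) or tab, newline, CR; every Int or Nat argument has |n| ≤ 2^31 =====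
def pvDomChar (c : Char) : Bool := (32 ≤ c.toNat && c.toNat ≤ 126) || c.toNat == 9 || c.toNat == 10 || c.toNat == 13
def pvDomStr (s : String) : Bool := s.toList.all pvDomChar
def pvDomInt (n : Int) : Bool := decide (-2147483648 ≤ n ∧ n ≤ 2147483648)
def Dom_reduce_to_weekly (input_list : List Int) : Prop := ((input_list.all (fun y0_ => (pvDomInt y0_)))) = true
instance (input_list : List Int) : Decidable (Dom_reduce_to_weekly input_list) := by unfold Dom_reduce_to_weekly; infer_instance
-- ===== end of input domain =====

-- B replaces A's element-wise running sum + counter (% 7) with a pass over 7-element chunks (idiomatic decomposition, same cost).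

-- ===== PORT A =====
-- one iteration of A's for-loop: state = (weekly_count, temp_sum, counter)
def stepA_reduce (st : List Int × Int × Int) (value : Int) : List Int × Int × Int :=
  let temp_sum := st.2.1 + value
  let counter := st.2.2 + 1
  if PySem.Int.mod counter 7 = 0 then (st.1 ++ [temp_sum], 0, counter)
  else (st.1, temp_sum, counter)

def reduce_to_weekly (input_list : List Int) : List Int :=
  let st := input_list.foldl stepA_reduce ([], 0, 0)
  if st.2.1 > 0 then st.1 ++ [st.2.1] else st.1

-- ===== PORT B =====
-- B's while-loop: i steps by 7 over the indices, chunk = input_list[i:i+7]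
def altLoopB_reduce (input_list : List Int) (i : Int) (weekly_count : List Int) : List Int :=
  if i < (input_list.length : Int) then
    let chunk := PySem.List.slice input_list (some i) (some (i + 7))
    let s := chunk.sum
    let weekly_count' := if chunk.length = 7 ∨ s > 0 then weekly_count ++ [s] else weekly_count
    altLoopB_reduce input_list (i + 7) weekly_count'
  else weekly_count
  termination_by ((input_list.length : Int) - i).toNat
  decreasing_by omega

def reduce_to_weekly_alt (input_list : List Int) : List Int :=
  altLoopB_reduce input_list 0 []

-- ===== PRECONDITION & SPEC =====
def Spec_reduce_to_weekly (input_list : List Int) (out : List Int) : Prop := out = reduce_to_weekly_alt input_list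
instance (input_list : List Int) (out : List Int) : Decidable (Spec_reduce_to_weekly input_list out) := by unfold Spec_reduce_to_weekly; infer_instance

-- ===== CLAIM (what is proved, stated in full; the proofs are below) =====
def Claim_equal_reduce_to_weekly : Prop := ∀ (input_list : List Int), Dom_reduce_to_weekly input_list → Spec_reduce_to_weekly input_list (reduce_to_weekly input_list)

-- ===== LEMMAS AND PROOFS =====

-- proof-only helper: B's loop seen as chunk-peeling recursion on the remaining list
def chunksB_reduce : List Int → List Int
  | [] => []
  | x :: xs =>
      let chunk := (x :: xs).take 7
      let rest := (x :: xs).drop 7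
      let s := chunk.sum
      if chunk.length = 7 ∨ s > 0 then s :: chunksB_reduce rest else chunksB_reduce rest
  termination_by xs => xs.length
  decreasing_by all_goals (simp only [List.length_drop, List.length_cons]; omega)

-- mid-level view shared by both proofs: t = current partial sum, r = slots left in the current week (1..7)
def gWeek : Int → Nat → List Int → List Int
  | t, _, [] => if t > 0 then [t] else []
  | t, r, a :: xs => if r = 1 then (t + a) :: gWeek 0 7 xs else gWeek (t + a) (r - 1) xs

lemma chunksB_nil : chunksB_reduce [] = [] := by
  rw [chunksB_reduce.eq_def]

lemma chunksB_cons (a : Int) (xs : List Int) :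
    chunksB_reduce (a :: xs) =
      if ((a :: xs).take 7).length = 7 ∨ ((a :: xs).take 7).sum > 0
      then ((a :: xs).take 7).sum :: chunksB_reduce ((a :: xs).drop 7)
      else chunksB_reduce ((a :: xs).drop 7) := by
  rw [chunksB_reduce.eq_def]

lemma altLoopB_eq_chunksB (xs : List Int) : ∀ (i : Int) (acc : List Int), 0 ≤ i →
    altLoopB_reduce xs i acc = acc ++ chunksB_reduce (xs.drop i.toNat) := by
  intro i
  induction hn : ((xs.length : Int) - i).toNat using Nat.strong_induction_on generalizing i with
  | _ n ih =>
      intro acc hi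
      rw [altLoopB_reduce]
      by_cases h : i < (xs.length : Int)
      · rw [if_pos h]
        have hsl : PySem.List.slice xs (some i) (some (i + 7))
            = (xs.drop i.toNat).take ((i + 7).toNat - i.toNat) :=
          PySem.List.slice_toNat xs hi (by omega)
        have h7 : (i + 7).toNat - i.toNat = 7 := by omega
        rw [h7] at hsl
        have hdd : xs.drop (i + 7).toNat = (xs.drop i.toNat).drop 7 := by
          rw [List.drop_drop]
          congr 1
          omega
        have hne : xs.drop i.toNat ≠ [] := by
          intro hcon
          have := congrArg List.length hcon
          simp only [List.length_drop, List.length_nil] at this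
          omega
        have hrec := ih (((xs.length : Int) - (i + 7)).toNat) (by omega) (i + 7) rfl
        have hchunk : chunksB_reduce (xs.drop i.toNat)
            = if ((xs.drop i.toNat).take 7).length = 7 ∨ ((xs.drop i.toNat).take 7).sum > 0
              then ((xs.drop i.toNat).take 7).sum :: chunksB_reduce ((xs.drop i.toNat).drop 7)
              else chunksB_reduce ((xs.drop i.toNat).drop 7) := by
          cases hxs : xs.drop i.toNat with
          | nil => exact absurd hxs hne
          | cons y ys => rw [chunksB_cons]
        simp only [hsl]
        by_cases hc : ((xs.drop i.toNat).take 7).length = 7 ∨ ((xs.drop i.toNat).take 7).sum > 0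
        · rw [if_pos hc, hrec (acc ++ [((xs.drop i.toNat).take 7).sum]) (by omega),
            hdd, hchunk, if_pos hc]
          simp
        · rw [if_neg hc, hrec acc (by omega), hdd, hchunk, if_neg hc]
      · rw [if_neg h]
        have hd : xs.drop i.toNat = [] := by
          apply List.drop_eq_nil_of_le
          omega
        rw [hd, chunksB_nil, List.append_nil]

lemma foldA_eq_gWeek : ∀ (xs acc : List Int) (t : Int) (n : Int), 0 ≤ n →
    (let st := xs.foldl stepA_reduce (acc, t, n);
     if st.2.1 > 0 then st.1 ++ [st.2.1] else st.1)
    = acc ++ gWeek t (7 - n.toNat % 7) xs := by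
  intro xs
  induction xs with
  | nil =>
      intro acc t n hn
      simp only [List.foldl_nil, gWeek]
      split <;> simp
  | cons a xs ih =>
      intro acc t n hn
      simp only [List.foldl_cons]
      have hmod : PySem.Int.mod (n + 1) 7 = (n + 1) % 7 :=
        PySem.Int.mod_eq_emod_of_pos (by norm_num)
      by_cases hfire : PySem.Int.mod (n + 1) 7 = 0
      · have h7 : (n + 1) % 7 = 0 := by rw [← hmod]; exact hfire
        have hr : 7 - n.toNat % 7 = 1 := by omega
        have hr' : 7 - (n + 1).toNat % 7 = 7 := by omega
        have hstep : stepA_reduce (acc, t, n) a = (acc ++ [t + a], 0, n + 1) := by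
          simp only [stepA_reduce]; rw [if_pos hfire]
        have hrec := ih (acc ++ [t + a]) 0 (n + 1) (by omega)
        rw [hr'] at hrec
        rw [hstep, hrec, hr]
        simp [gWeek]
      · have h7 : (n + 1) % 7 ≠ 0 := by rw [← hmod]; exact hfire
        have hne : n.toNat % 7 ≠ 6 := by omega
        have hr : 7 - (n + 1).toNat % 7 = (7 - n.toNat % 7) - 1 := by omega
        have hstep : stepA_reduce (acc, t, n) a = (acc, t + a, n + 1) := by
          simp only [stepA_reduce]; rw [if_neg hfire]
        have hrec := ih acc (t + a) (n + 1) (by omega)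
        rw [hstep, hrec, hr]
        have hr1 : 7 - n.toNat % 7 ≠ 1 := by omega
        conv_rhs => rw [gWeek]
        rw [if_neg hr1]

lemma gWeek_take : ∀ (r : Nat) (xs : List Int) (t : Int), 1 ≤ r →
    gWeek t r xs = if (xs.take r).length = r
                   then (t + (xs.take r).sum) :: gWeek 0 7 (xs.drop r)
                   else (if t + xs.sum > 0 then [t + xs.sum] else []) := by
  intro r
  induction r with
  | zero => intro xs t h; omega
  | succ r ih =>
      intro xs t _
      cases xs with
      | nil =>
          simp [gWeek]
      | cons a xs =>
          by_cases h1 : r = 0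
          · subst h1
            simp [gWeek]
          · have hr1 : r + 1 ≠ 1 := by omega
            conv_lhs => rw [gWeek]
            rw [if_neg hr1]
            simp only [Nat.add_sub_cancel]
            rw [ih xs (t + a) (by omega)]
            simp only [List.take_succ_cons, List.length_cons, List.sum_cons,
              List.drop_succ_cons]
            by_cases hlen : (xs.take r).length = r
            · rw [if_pos hlen, if_pos (show (xs.take r).length + 1 = r + 1 by omega)]
              rw [add_assoc]
            · rw [if_neg hlen, if_neg (show ¬((xs.take r).length + 1 = r + 1) by omega)]
              rw [add_assoc]

lemma chunksB_eq_gWeek (xs : List Int) : chunksB_reduce xs = gWeek 0 7 xs := by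
  induction hn : xs.length using Nat.strong_induction_on generalizing xs with
  | _ n ih =>
      cases xs with
      | nil => rw [chunksB_nil, gWeek]; norm_num
      | cons a xs =>
          simp only [List.length_cons] at hn
          have hdrop : ((a :: xs).drop 7).length < n := by
            simp only [List.length_drop, List.length_cons]
            omega
          have ihr := ih _ hdrop _ rfl
          rw [chunksB_cons, ihr, gWeek_take 7 (a :: xs) 0 (by omega)]
          by_cases hfull : ((a :: xs).take 7).length = 7
          · rw [if_pos (Or.inl hfull), if_pos hfull, zero_add]
          · have hle : (a :: xs).length ≤ 7 := by
              by_contra h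
              apply hfull
              rw [List.length_take]; omega
            have hs : (a :: xs).take 7 = a :: xs := List.take_of_length_le hle
            have hd : (a :: xs).drop 7 = [] := List.drop_eq_nil_of_le hle
            rw [hs] at hfull
            rw [hs, hd, if_neg hfull, zero_add]
            by_cases hpos : (a :: xs).sum > 0
            · rw [if_pos (Or.inr hpos), if_pos hpos]
              norm_num [gWeek]
            · rw [if_neg (not_or.mpr ⟨hfull, hpos⟩), if_neg hpos]
              norm_num [gWeek]

-- ===== VERDICT (by name: the statement is the Claim_ definition above) =====
theorem reduce_to_weekly_spec : Claim_equal_reduce_to_weekly := by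
  intro xs _
  show reduce_to_weekly xs = reduce_to_weekly_alt xs
  unfold reduce_to_weekly reduce_to_weekly_alt
  rw [altLoopB_eq_chunksB xs 0 [] le_rfl]
  simp only [Int.toNat_zero, List.drop_zero, List.nil_append]
  rw [chunksB_eq_gWeek]
  have := foldA_eq_gWeek xs [] 0 0 le_rfl
  simpa using this
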